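-- pv_equiv track=rewrite | github.com/jasonj2333/Python_SPP | iepypm/Rozdzial 3/Przyklad_3.12/zad_2.py | zad_2
-- ===== SOURCE A (Python) =====
-- def zad_2(A, p):
--     pierwsza, druga = 0, 0
--     for j in A:
--         if j % p != 0:
--             if j > pierwsza:
--                 druga = pierwsza
--                 pierwsza = j
--             elif j > druga: druga = j
--     S = pierwsza * druga
--     return S
-- ===== SOURCE B (Python) =====
-- def zad_2(A, p):
--     nums = [j for j in A if j % p != 0]
--     nums += [0, 0]
--     t = sorted(nums, reverse=True)
--     return t[0] * t[1]
-- ===== Notes on version B (the rewrite author's own statement) =====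
-- stated objective: simpler
-- what changed: Replaces the online two-running-maxima conditional cascade by filter, append the two implicit 0 seeds, sort descending and multiply the first two elements.
import Mathlib
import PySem

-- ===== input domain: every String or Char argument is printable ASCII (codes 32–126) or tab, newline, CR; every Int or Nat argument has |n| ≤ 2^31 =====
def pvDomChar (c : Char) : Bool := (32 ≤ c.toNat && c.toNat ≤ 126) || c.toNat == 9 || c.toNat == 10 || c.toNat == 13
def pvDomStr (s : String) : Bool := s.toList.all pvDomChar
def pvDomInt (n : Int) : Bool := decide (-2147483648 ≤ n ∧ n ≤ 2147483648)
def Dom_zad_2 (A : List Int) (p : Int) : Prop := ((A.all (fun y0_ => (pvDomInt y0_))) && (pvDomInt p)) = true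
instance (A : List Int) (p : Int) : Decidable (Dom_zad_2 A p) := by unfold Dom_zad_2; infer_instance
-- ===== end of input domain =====

-- B replaces A's online two-running-maxima cascade by filter + append the two 0 seeds + sort descending + multiply the first two (objective: simpler).

-- ===== PORT A =====
def zad_2 (A : List Int) (p : Int) : Int :=
  let s := A.foldl (fun (s : Int × Int) j =>
    if PySem.Int.mod j p ≠ 0 then
      if j > s.1 then (j, s.1)
      else if j > s.2 then (s.1, j)
      else s
    else s) (0, 0)
  s.1 * s.2

-- ===== PORT B =====
def zad_2_alt (A : List Int) (p : Int) : Int :=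
  let nums := (A.filter (fun j => PySem.Int.mod j p ≠ 0)) ++ [0, 0]
  let t := PySem.List.sorted nums (fun x => x) true
  -- t has ≥ 2 elements (nums ends in [0, 0]); the default branch is unreachable
  match t with
  | t0 :: t1 :: _ => t0 * t1
  | _ => 0

-- ===== PRECONDITION & SPEC =====
-- Pre_ excludes exactly the inputs where Python raises ZeroDivisionError: p = 0 with a nonempty A (both A and B evaluate j % p there).
def Pre_zad_2 (A : List Int) (p : Int) : Prop := A = [] ∨ p ≠ 0
instance (A : List Int) (p : Int) : Decidable (Pre_zad_2 A p) := by unfold Pre_zad_2; infer_instance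
def pvWitness_zad_2 : List Int × Int := ([3, 5, 2, -4], 2)

def Spec_zad_2 (A : List Int) (p : Int) (out : Int) : Prop := out = zad_2_alt A p
instance (A : List Int) (p : Int) (out : Int) : Decidable (Spec_zad_2 A p out) := by unfold Spec_zad_2; infer_instance

-- ===== CLAIM (what is proved, stated in full; the proofs are below) =====
def Claim_equal_zad_2 : Prop := ∀ (A : List Int) (p : Int), Dom_zad_2 A p → Pre_zad_2 A p → Spec_zad_2 A p (zad_2 A p)

-- ===== LEMMAS AND PROOFS =====

-- A's loop body on an element that passed the divisibility test
def pvStep (s : Int × Int) (j : Int) : Int × Int :=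
  if j > s.1 then (j, s.1) else if j > s.2 then (s.1, j) else s

-- A's guarded fold is the fold of pvStep over the filtered list
theorem pvFoldEq (p : Int) (l : List Int) (s : Int × Int) :
    l.foldl (fun (s : Int × Int) j =>
      if PySem.Int.mod j p ≠ 0 then
        if j > s.1 then (j, s.1)
        else if j > s.2 then (s.1, j)
        else s
      else s) s
    = (l.filter (fun j => PySem.Int.mod j p ≠ 0)).foldl pvStep s := by
  induction l generalizing s with
  | nil => rfl
  | cons j l ih =>
    rw [List.foldl_cons, List.filter_cons]
    by_cases h : PySem.Int.mod j p ≠ 0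
    · rw [if_pos (show decide (PySem.Int.mod j p ≠ 0) = true by simpa using h),
          List.foldl_cons, if_pos h]
      exact ih _
    · rw [if_neg (show ¬ decide (PySem.Int.mod j p ≠ 0) = true by simpa using h), if_neg h]
      exact ih s

-- both components of the running pair only grow
theorem pvStep_mono (xs : List Int) (a b : Int) (hba : b ≤ a) :
    b ≤ (xs.foldl pvStep (a, b)).2 ∧ (xs.foldl pvStep (a, b)).2 ≤ (xs.foldl pvStep (a, b)).1 := by
  induction xs generalizing a b with
  | nil => simp only [List.foldl_nil]; exact ⟨le_refl b, hba⟩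
  | cons j xs ih =>
    simp only [List.foldl_cons, pvStep]
    split_ifs with h1 h2
    · exact ⟨hba.trans (ih j a (le_of_lt h1)).1, (ih j a (le_of_lt h1)).2⟩
    · exact ⟨(le_of_lt h2).trans (ih a j (not_lt.mp h1)).1, (ih a j (not_lt.mp h1)).2⟩
    · exact ih a b hba

-- permutation bookkeeping for one loop step
theorem pvPermStep {l : List Int} {a₁ b₁ a' b' d : Int} {xs rest : List Int}
    (h0 : l.Perm (d :: a₁ :: b₁ :: xs))
    (hperm : (a₁ :: b₁ :: xs).Perm (a' :: b' :: rest)) :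
    l.Perm (a' :: b' :: d :: rest) :=
  h0.trans ((List.Perm.cons d hperm).trans
    ((List.Perm.swap a' d (b' :: rest)).trans (List.Perm.cons a' (List.Perm.swap b' d rest))))

-- Invariant: the fold keeps the two largest of the multiset a ::ₘ b ::ₘ xs (seeded with b ≤ a)
theorem pvFold_topTwo (xs : List Int) (a b : Int) (hba : b ≤ a) :
    ∃ rest : List Int,
      (a :: b :: xs).Perm ((xs.foldl pvStep (a, b)).1 :: (xs.foldl pvStep (a, b)).2 :: rest) ∧
      ∀ x ∈ rest, x ≤ (xs.foldl pvStep (a, b)).2 := by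
  induction xs generalizing a b with
  | nil => exact ⟨[], by simp, by simp⟩
  | cons j xs ih =>
    simp only [List.foldl_cons, pvStep]
    split_ifs with h1 h2
    · obtain ⟨rest, hperm, hrest⟩ := ih j a (le_of_lt h1)
      refine ⟨b :: rest, pvPermStep ?_ hperm, ?_⟩
      · exact (List.Perm.swap b a (j :: xs)).trans (List.Perm.cons b (List.Perm.swap j a xs))
      · intro x hx
        rcases List.mem_cons.mp hx with rfl | hx
        · exact hba.trans (pvStep_mono xs j a (le_of_lt h1)).1
        · exact hrest x hx
    · obtain ⟨rest, hperm, hrest⟩ := ih a j (not_lt.mp h1)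
      refine ⟨b :: rest, pvPermStep ?_ hperm, ?_⟩
      · exact List.Perm.swap b a (j :: xs)
      · intro x hx
        rcases List.mem_cons.mp hx with rfl | hx
        · exact (le_of_lt h2).trans (pvStep_mono xs a j (not_lt.mp h1)).1
        · exact hrest x hx
    · obtain ⟨rest, hperm, hrest⟩ := ih a b hba
      refine ⟨j :: rest, pvPermStep ?_ hperm, ?_⟩
      · exact (List.Perm.cons a (List.Perm.swap j b xs)).trans (List.Perm.swap j a (b :: xs))
      · intro x hx
        rcases List.mem_cons.mp hx with rfl | hx
        · exact (not_lt.mp h2).trans (pvStep_mono xs a b hba).1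
        · exact hrest x hx

-- ===== VERDICT (by name: the statement is the Claim_ definition above) =====
theorem zad_2_spec : Claim_equal_zad_2 := by
  intro A p _ _
  unfold Spec_zad_2 zad_2 zad_2_alt
  rw [pvFoldEq]
  set xs := A.filter (fun j => PySem.Int.mod j p ≠ 0) with hxs
  obtain ⟨rest, hperm, hrest⟩ := pvFold_topTwo xs 0 0 le_rfl
  set a' := (xs.foldl pvStep (0, 0)).1 with ha'
  set b' := (xs.foldl pvStep (0, 0)).2 with hb'
  have hmono := pvStep_mono xs 0 0 le_rfl
  have hnums : (xs ++ [0, 0]).Perm (a' :: b' :: rest) :=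
    List.Perm.trans List.perm_append_comm hperm
  have hsorted : PySem.List.sorted (xs ++ [0, 0]) (fun x => x) true
      = a' :: b' :: PySem.List.sorted rest (fun x => x) true := by
    have h1 : (PySem.List.sorted (xs ++ [0, 0]) (fun x => x) true).Perm
        (a' :: b' :: PySem.List.sorted rest (fun x => x) true) :=
      (PySem.List.sorted_perm _ _ _).trans (hnums.trans
        (List.Perm.cons _ (List.Perm.cons _ (PySem.List.sorted_perm _ _ _).symm)))
    have hp1 : (PySem.List.sorted (xs ++ [0, 0]) (fun x => x) true).Pairwise (fun x y => y ≤ x) :=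
      PySem.List.sorted_pairwise_rev _ _
    have hp2 : (a' :: b' :: PySem.List.sorted rest (fun x => x) true).Pairwise
        (fun x y => y ≤ x) := by
      refine List.pairwise_cons.mpr ⟨?_, List.pairwise_cons.mpr
        ⟨?_, PySem.List.sorted_pairwise_rev _ _⟩⟩
      · intro y hy
        rcases List.mem_cons.mp hy with rfl | hy
        · exact hmono.2
        · exact (hrest y ((PySem.List.mem_sorted _ _ _ _).mp hy)).trans hmono.2
      · intro y hy
        exact hrest y ((PySem.List.mem_sorted _ _ _ _).mp hy)
    exact h1.eq_of_pairwise (fun a b _ _ hab hba => le_antisymm hba hab) hp1 hp2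
  simp only [hsorted]
  rfl
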